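-- pv_equiv track=rewrite | github.com/AH-Huynh942/Twitter_bot | utilities/string_fix.py | search_for_sentence
-- ===== SOURCE A (Python) =====
-- def search_for_sentence(text):
--   uppercase_int = 0  # if all lowercase
--   punctuation_int = len(text)
--   uppercase_found = False
--   for i in range(len(text)):
--     if text[i].isupper() and not uppercase_found:
--       uppercase_int = i
--       uppercase_found = True
--     if text[i] == '!' or text[i] == '?' or text[i] == '.':
--       punctuation_int = i + 1
--       break
--   return (uppercase_int, punctuation_int, text[uppercase_int:punctuation_int])
-- ===== SOURCE B (Python) =====
-- def search_for_sentence(text):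
--   punctuation_int = next((i + 1 for i, ch in enumerate(text) if ch in "!?."), len(text))
--   uppercase_int = next((i for i, ch in enumerate(text[:punctuation_int]) if ch.isupper()), 0)
--   return (uppercase_int, punctuation_int, text[uppercase_int:punctuation_int])
-- ===== Notes on version B (the rewrite author's own statement) =====
-- stated objective: idiomatic
-- what changed: Replaces A's single fused loop with flag variables by two independent library-aided scans: first find the sentence-ending punctuation index, then find the first uppercase letter within that prefix.
import Mathlib
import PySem

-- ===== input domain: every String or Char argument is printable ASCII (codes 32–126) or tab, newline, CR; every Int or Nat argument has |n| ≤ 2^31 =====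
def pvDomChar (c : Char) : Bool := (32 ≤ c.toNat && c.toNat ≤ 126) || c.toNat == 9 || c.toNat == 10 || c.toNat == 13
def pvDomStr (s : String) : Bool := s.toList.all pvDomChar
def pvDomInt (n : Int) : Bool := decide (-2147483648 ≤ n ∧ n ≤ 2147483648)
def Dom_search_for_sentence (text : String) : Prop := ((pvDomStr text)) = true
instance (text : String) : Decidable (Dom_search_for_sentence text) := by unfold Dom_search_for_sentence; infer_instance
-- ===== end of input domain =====

-- B replaces A's single fused loop (flag variables, break) by two independent scans:
-- find the punctuation index first, then the first uppercase letter within that prefix (objective: idiomatic).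

-- ===== PORT A =====
-- A's for-loop with break: structural recursion over the characters, carrying
-- the index i, the uppercase accumulator u, the found flag, and the default p = len(text).
def pvLoopA : List Char → Int → Int → Bool → Int → Int × Int
  | [], _, u, _, p => (u, p)
  | c :: rest, i, u, found, p =>
    let s := if PySem.Chars.isupper c && !found then (i, true) else (u, found)
    if c == '!' || c == '?' || c == '.' then (s.1, i + 1)
    else pvLoopA rest (i + 1) s.1 s.2 p

def search_for_sentence (text : String) : Int × Int × String :=
  let up := pvLoopA text.toList 0 0 false (PySem.Str.len text)
  (up.1, up.2, PySem.Str.slice text (some up.1) (some up.2))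

-- ===== PORT B =====
-- next((i+1 for i, ch in enumerate(text) if ch in "!?."), default): first punctuation scan.
-- `ch in "!?."` for a single char is ported by hand as membership in the literal char list (exact).
def pvFindPunct : List Char → Int → Option Int
  | [], _ => none
  | c :: rest, i => if ['!', '?', '.'].contains c then some (i + 1) else pvFindPunct rest (i + 1)

-- next((i for i, ch in enumerate(prefix) if ch.isupper()), default): first-uppercase scan
def pvFindUpper : List Char → Int → Option Int
  | [], _ => none
  | c :: rest, i => if PySem.Chars.isupper c then some i else pvFindUpper rest (i + 1)

def search_for_sentence_alt (text : String) : Int × Int × String :=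
  let p := (pvFindPunct text.toList 0).getD (PySem.Str.len text)
  let u := (pvFindUpper (PySem.List.slice text.toList none (some p)) 0).getD 0
  (u, p, PySem.Str.slice text (some u) (some p))

-- ===== PRECONDITION & SPEC =====
def Spec_search_for_sentence (text : String) (out : Int × Int × String) : Prop := out = search_for_sentence_alt text
instance (text : String) (out : Int × Int × String) : Decidable (Spec_search_for_sentence text out) := by unfold Spec_search_for_sentence; infer_instance

-- ===== CLAIM (what is proved, stated in full; the proofs are below) =====
def Claim_equal_search_for_sentence : Prop := ∀ (text : String), Dom_search_for_sentence text → Spec_search_for_sentence text (search_for_sentence text)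

-- ===== LEMMAS AND PROOFS =====

-- proof-only helpers: position+1 of the first punctuation and position of the first
-- uppercase character in a character list, as zero-based Nat options
def pvPO : List Char → Option Nat
  | [] => none
  | c :: rest => if ['!', '?', '.'].contains c then some 1 else (pvPO rest).map (· + 1)

def pvFU : List Char → Option Nat
  | [] => none
  | c :: rest => if PySem.Chars.isupper c then some 0 else (pvFU rest).map (· + 1)

-- the scanned prefix length: up to and including the first punctuation, else the whole list
def pvPLen (cs : List Char) : Nat := (pvPO cs).getD cs.length

theorem pvFindPunct_eq (cs : List Char) : ∀ (i : Int),
    pvFindPunct cs i = (pvPO cs).map (fun k => i + (k : Int)) := by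
  induction cs with
  | nil => simp [pvFindPunct, pvPO]
  | cons c rest ih =>
    intro i
    by_cases hp : c = '!' ∨ c = '?' ∨ c = '.'
    · simp [pvFindPunct, pvPO, hp]
    · have hb : ['!', '?', '.'].contains c = false := by
        simp only [List.contains_eq_mem, List.mem_cons, List.not_mem_nil, or_false,
          decide_eq_false_iff_not]
        tauto
      simp only [pvFindPunct, pvPO, hb, Bool.false_eq_true, if_false]
      rw [ih (i + 1)]
      cases pvPO rest with
      | none => simp
      | some k => simp; push_cast; ring

theorem pvFindUpper_eq (cs : List Char) : ∀ (i : Int),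
    pvFindUpper cs i = (pvFU cs).map (fun k => i + (k : Int)) := by
  induction cs with
  | nil => simp [pvFindUpper, pvFU]
  | cons c rest ih =>
    intro i
    by_cases hc : PySem.Chars.isupper c = true
    · simp [pvFindUpper, pvFU, hc]
    · simp only [pvFindUpper, pvFU, hc, if_false, Bool.false_eq_true, ih (i + 1)]
      cases pvFU rest with
      | none => simp
      | some k => simp; push_cast; ring

theorem punct_not_upper (c : Char) (h : c = '!' ∨ c = '?' ∨ c = '.') :
    PySem.Chars.isupper c = false := by
  rcases h with h | h | h <;> subst h <;> decide

theorem pvPLen_cons_not_punct (c : Char) (rest : List Char)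
    (hb : ['!', '?', '.'].contains c = false) :
    (c :: rest).take (pvPLen (c :: rest)) = c :: rest.take (pvPLen rest) := by
  simp only [pvPLen, pvPO, hb, Bool.false_eq_true, if_false]
  cases pvPO rest <;> simp

-- the fused loop of A computed from the two separate scans of B
theorem pvLoopA_true (cs : List Char) : ∀ (i u p : Int),
    pvLoopA cs i u true p = (u, (pvFindPunct cs i).getD p) := by
  induction cs with
  | nil => simp [pvLoopA, pvFindPunct]
  | cons c rest ih =>
    intro i u p
    by_cases hp : c = '!' ∨ c = '?' ∨ c = '.'
    · simp [pvLoopA, pvFindPunct, hp] <;> tauto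
    · simp [pvLoopA, pvFindPunct, hp, ih] <;> tauto

theorem pvLoopA_false (cs : List Char) : ∀ (i u p : Int),
    pvLoopA cs i u false p =
      ((pvFU (cs.take (pvPLen cs))).elim u (fun k => i + (k : Int)),
        (pvFindPunct cs i).getD p) := by
  induction cs with
  | nil => simp [pvLoopA, pvFindPunct, pvPLen, pvPO, pvFU]
  | cons c rest ih =>
    intro i u p
    by_cases hp : c = '!' ∨ c = '?' ∨ c = '.'
    · have hu := punct_not_upper c hp
      simp [pvLoopA, pvFindPunct, pvPLen, pvPO, pvFU, hp, hu] <;> tauto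
    · have hb : ['!', '?', '.'].contains c = false := by
        simp only [List.contains_eq_mem, List.mem_cons, List.not_mem_nil, or_false,
          decide_eq_false_iff_not]
        tauto
      rw [pvPLen_cons_not_punct c rest hb]
      by_cases hu : PySem.Chars.isupper c = true
      · simp [pvLoopA, pvFindPunct, pvFU, hp, hu, pvLoopA_true] <;> tauto
      · simp only [pvLoopA, pvFindPunct, pvFU, hu, if_false, Bool.false_eq_true,
          Bool.false_and, Bool.and_false, hb, ih]
        have hbb : (c == '!' || c == '?' || c == '.') = false := by
          simp only [Bool.or_eq_false_iff, beq_eq_false_iff_ne, ne_eq]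
          tauto
        simp only [hbb, Bool.false_eq_true, if_false]
        cases pvFU (rest.take (pvPLen rest)) with
        | none => simp
        | some k => simp; omega

theorem slice_take (text : String) :
    PySem.List.slice text.toList none
        (some ((pvFindPunct text.toList 0).getD (PySem.Str.len text)))
      = text.toList.take (pvPLen text.toList) := by
  rw [pvFindPunct_eq, PySem.List.slice_to]
  · cases h : pvPO text.toList with
    | none => simp [h, pvPLen, PySem.Str.len_eq]
    | some k => simp [h, pvPLen]
  · cases h : pvPO text.toList with
    | none => simp [h, PySem.Str.len_eq]
    | some k => simp [h]

-- ===== VERDICT (by name: the statement is the Claim_ definition above) =====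
theorem search_for_sentence_spec : Claim_equal_search_for_sentence := by
  intro text _
  unfold Spec_search_for_sentence search_for_sentence search_for_sentence_alt
  simp only [pvLoopA_false, pvFindUpper_eq, slice_take]
  cases pvFU (text.toList.take (pvPLen text.toList)) <;> simp
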